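-- pv_equiv track=rewrite | github.com/seagullQ77/nfd-autotest | codewars/performant_smallest.py | performant_smallest
-- ===== SOURCE A (Python) =====
-- def performant_smallest(arr, n):
--     s = arr[:n]
--
--     for i in range(n, len(arr)):
--         maxs = max(s)
--         if maxs > arr[i]:
--             s.remove(maxs)
--             s.append(arr[i])
--     return s
-- ===== SOURCE B (Python) =====
-- import heapq
--
-- def performant_smallest(arr, n):
--     # max-heap of (-value, index): pop order = largest value, then earliest index,
--     # which matches A's s.remove(max(s)); survivors come out sorted by index.
--     h = [(-v, i) for i, v in enumerate(arr[:n])]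
--     heapq.heapify(h)
--     for i in range(n, len(arr)):
--         x = arr[i]
--         if -h[0][0] > x:
--             heapq.heapreplace(h, (-x, i))
--     h.sort(key=lambda t: t[1])
--     return [-v for v, _ in h]
-- ===== Notes on version B (the rewrite author's own statement) =====
-- stated objective: faster
-- what changed: Replaces the per-iteration linear max(s)/s.remove(maxs) rescans with a heap of (-value, index) pairs (lazy replacement via heapreplace), recovering A's exact output order by a final sort on the stored indices.
-- outside the precondition, e.g. on performant_smallest([-1, -3, 0, -2, 2], -2): A returns [-3, -2, -3], B returns [-2, -3, -3]
import Mathlib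
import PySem

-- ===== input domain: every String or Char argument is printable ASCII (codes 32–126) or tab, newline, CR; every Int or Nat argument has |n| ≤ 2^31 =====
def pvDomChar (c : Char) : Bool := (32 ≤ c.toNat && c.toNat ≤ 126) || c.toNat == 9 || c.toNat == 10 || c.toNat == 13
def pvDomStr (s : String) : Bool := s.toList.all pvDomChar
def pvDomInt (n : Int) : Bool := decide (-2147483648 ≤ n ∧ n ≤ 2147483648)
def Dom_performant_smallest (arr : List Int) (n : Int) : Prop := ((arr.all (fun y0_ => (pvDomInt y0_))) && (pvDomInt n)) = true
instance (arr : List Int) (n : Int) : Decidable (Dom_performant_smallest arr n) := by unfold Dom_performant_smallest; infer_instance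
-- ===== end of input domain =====

-- B replaces A's per-iteration max(s)/remove rescans by a heap of (-value, index)
-- pairs with a final sort by index (objective: faster; return value only, no
-- caller-visible mutation in either version).

-- ===== PORT A =====
-- literal port of A: s = arr[:n]; for i in range(n, len(arr)): maxs = max(s);
-- if maxs > arr[i]: s.remove(maxs); s.append(arr[i]).  The '| _, _ => s'
-- branch only covers the raising cases (max of empty / bad index), excluded by Pre_.
def performant_smallest (arr : List Int) (n : Int) : List Int :=
  (PySem.List.pyRange n (arr.length : Int) 1).foldl
    (fun s i =>
      match PySem.List.max? s (fun y => y), PySem.List.pyGet? arr i with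
      | some maxs, some x =>
          if maxs > x then ((PySem.List.remove? s maxs).getD s) ++ [x] else s
      | _, _ => s)
    (PySem.List.slice arr none (some n))

-- ===== PORT B =====
-- literal port of Source B; heapq is ported by its contract on the multiset h:
-- h[0] is the lexicographically least pair (min2?), heapreplace pops that pair
-- and pushes the new one.  '| _, _ => h' covers the raising cases only.
-- one loop iteration of Source B: read the heap top, lazily replace it if larger
def pvHeapStep (arr : List Int) (h : List (Int × Int)) (i : Int) : List (Int × Int) :=
  match PySem.List.pyGet? arr i with
  | none => h
  | some x =>
      match PySem.List.min2? h Prod.fst Prod.snd with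
      | none => h
      | some m =>
          if -m.1 > x then ((PySem.List.remove? h m).getD h) ++ [(-x, i)] else h

def performant_smallest_alt (arr : List Int) (n : Int) : List Int :=
  let h0 := (PySem.List.enumerate (PySem.List.slice arr none (some n)) 0).map
      (fun p => (-p.2, p.1));
  let h := (PySem.List.pyRange n (arr.length : Int) 1).foldl (pvHeapStep arr) h0;
  (PySem.List.sorted h Prod.snd).map (fun p => -p.1)

-- ===== PRECONDITION & SPEC =====
-- Pre_ excludes n ≤ 0 except the empty-list case: with nonempty arr, n = 0 makes A
-- raise ValueError (max of empty list), and a negative n goes through Python's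
-- negative slice/index wraparound — an accident of A's implementation on which its
-- result is not the function's intent (A returns there; see the cite in the claim).
def Pre_performant_smallest (arr : List Int) (n : Int) : Prop :=
  1 ≤ n ∨ (arr = [] ∧ 0 ≤ n)
instance (arr : List Int) (n : Int) : Decidable (Pre_performant_smallest arr n) := by
  unfold Pre_performant_smallest; infer_instance
def pvWitness_performant_smallest : List Int × Int := ([5, 1, 4, 2, 3], 2)

def Spec_performant_smallest (arr : List Int) (n : Int) (out : List Int) : Prop :=
  out = performant_smallest_alt arr n
instance (arr : List Int) (n : Int) (out : List Int) : Decidable (Spec_performant_smallest arr n out) := by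
  unfold Spec_performant_smallest; infer_instance

-- ===== CLAIM (what is proved, stated in full; the proofs are below) =====
def Claim_equal_performant_smallest : Prop :=
  ∀ (arr : List Int) (n : Int), Dom_performant_smallest arr n →
    Pre_performant_smallest arr n →
    Spec_performant_smallest arr n (performant_smallest arr n)

-- ===== LEMMAS AND PROOFS =====

-- A's loop body, named for the proofs (definitionally equal to the lambda in port A)
def pvStepA (arr : List Int) (s : List Int) (i : Int) : List Int :=
  match PySem.List.max? s (fun y => y), PySem.List.pyGet? arr i with
  | some maxs, some x =>
      if maxs > x then ((PySem.List.remove? s maxs).getD s) ++ [x] else s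
  | _, _ => s

-- m is lexicographically ≤ p (Python tuple order on (Int, Int))
def pvLexLe (m p : Int × Int) : Prop := m.1 < p.1 ∨ (m.1 = p.1 ∧ m.2 ≤ p.2)

lemma pvLexLe_refl (m : Int × Int) : pvLexLe m m := Or.inr ⟨rfl, le_refl _⟩

lemma pvLexLe_trans {a b c : Int × Int} (h1 : pvLexLe a b) (h2 : pvLexLe b c) : pvLexLe a c := by
  rcases h1 with h1 | ⟨e1, l1⟩ <;> rcases h2 with h2 | ⟨e2, l2⟩
  · exact Or.inl (h1.trans h2)
  · exact Or.inl (e2 ▸ h1)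
  · exact Or.inl (e1 ▸ h2)
  · exact Or.inr ⟨e1.trans e2, l1.trans l2⟩

-- the generalized foldl run of min2? (accumulator version)
lemma pv_min2_go (t : List (Int × Int)) : ∀ (a : Int × Int),
    ∃ m, t.foldl
        (fun acc x => match acc with
          | none => some x
          | some q =>
              if (decide (x.1 < q.1) || !decide (q.1 < x.1) && decide (x.2 < q.2)) = true
              then some x else some q)
        (some a) = some m
      ∧ (m = a ∨ m ∈ t) ∧ pvLexLe m a ∧ ∀ p ∈ t, pvLexLe m p := by
  induction t with
  | nil => intro a; exact ⟨a, rfl, Or.inl rfl, pvLexLe_refl a, by simp⟩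
  | cons x t ih =>
    intro a
    simp only [List.foldl_cons]
    by_cases hc : (decide (x.1 < a.1) || !decide (a.1 < x.1) && decide (x.2 < a.2)) = true
    · -- accumulator becomes x
      obtain ⟨m, hm, hmem, hle, hall⟩ := ih x
      have hxa : pvLexLe x a := by
        simp only [Bool.or_eq_true, Bool.and_eq_true, Bool.not_eq_true', decide_eq_true_eq,
          decide_eq_false_iff_not] at hc
        rcases hc with h | ⟨h1, h2⟩
        · exact Or.inl h
        · rcases lt_trichotomy x.1 a.1 with h | h | h
          · exact Or.inl h
          · exact Or.inr ⟨h, le_of_lt h2⟩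
          · exact absurd h h1
      refine ⟨m, by simpa [hc] using hm, ?_, pvLexLe_trans hle hxa, ?_⟩
      · rcases hmem with rfl | hmem
        · exact Or.inr List.mem_cons_self
        · exact Or.inr (List.mem_cons_of_mem _ hmem)
      · intro p hp
        rcases List.mem_cons.mp hp with rfl | hp
        · exact hle
        · exact hall p hp
    · -- accumulator stays a
      obtain ⟨m, hm, hmem, hle, hall⟩ := ih a
      have hax : pvLexLe a x := by
        simp only [Bool.or_eq_true, Bool.and_eq_true, Bool.not_eq_true', decide_eq_true_eq,
          decide_eq_false_iff_not] at hc
        rcases not_or.mp hc with ⟨h1, h2⟩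
        by_cases hax1 : a.1 < x.1
        · exact Or.inl hax1
        · have he : a.1 = x.1 := by omega
          have h3 : ¬ x.2 < a.2 := fun hlt2 => h2 ⟨hax1, hlt2⟩
          exact Or.inr ⟨he, by omega⟩
      refine ⟨m, by simpa [hc] using hm, ?_, hle, ?_⟩
      · rcases hmem with rfl | hmem
        · exact Or.inl rfl
        · exact Or.inr (List.mem_cons_of_mem _ hmem)
      · intro p hp
        rcases List.mem_cons.mp hp with rfl | hp
        · exact pvLexLe_trans hle hax
        · exact hall p hp

lemma pv_min2_spec (h : List (Int × Int)) (hne : h ≠ []) :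
    ∃ m, PySem.List.min2? h Prod.fst Prod.snd = some m ∧ m ∈ h ∧ ∀ p ∈ h, pvLexLe m p := by
  match h with
  | [] => exact absurd rfl hne
  | a :: t =>
    obtain ⟨m, hm, hmem, hle, hall⟩ := pv_min2_go t a
    have e : PySem.List.min2? (a :: t) Prod.fst Prod.snd
        = t.foldl
          (fun acc x => match acc with
            | none => some x
            | some q =>
                if (decide (x.1 < q.1) || !decide (q.1 < x.1) && decide (x.2 < q.2)) = true
                then some x else some q)
          (some a) := by
      unfold PySem.List.min2?
      rw [List.foldl_cons]
      congr 1
      funext acc x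
      cases acc <;> rfl
    refine ⟨m, by rw [e]; exact hm, ?_, ?_⟩
    · rcases hmem with rfl | hmem
      · exact List.mem_cons_self
      · exact List.mem_cons_of_mem _ hmem
    · intro p hp
      rcases List.mem_cons.mp hp with rfl | hp
      · exact hle
      · exact hall p hp

-- the generalized foldl run of max? with the identity key
lemma pv_max_go (t : List Int) : ∀ (a : Int),
    ∃ mx, t.foldl
        (fun acc x => match acc with
          | none => some x
          | some m => if m < x then some x else some m)
        (some a) = some mx
      ∧ (mx = a ∨ mx ∈ t) ∧ a ≤ mx ∧ ∀ y ∈ t, y ≤ mx := by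
  induction t with
  | nil => intro a; exact ⟨a, rfl, Or.inl rfl, le_refl _, by simp⟩
  | cons x t ih =>
    intro a
    simp only [List.foldl_cons]
    by_cases hc : a < x
    · obtain ⟨mx, hmx, hmem, hle, hall⟩ := ih x
      refine ⟨mx, by simpa [hc] using hmx, ?_, le_trans (le_of_lt hc) hle, ?_⟩
      · rcases hmem with rfl | hmem
        · exact Or.inr List.mem_cons_self
        · exact Or.inr (List.mem_cons_of_mem _ hmem)
      · intro y hy
        rcases List.mem_cons.mp hy with rfl | hy
        · exact hle
        · exact hall y hy
    · obtain ⟨mx, hmx, hmem, hle, hall⟩ := ih a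
      refine ⟨mx, by simpa [hc] using hmx, ?_, hle, ?_⟩
      · rcases hmem with rfl | hmem
        · exact Or.inl rfl
        · exact Or.inr (List.mem_cons_of_mem _ hmem)
      · intro y hy
        rcases List.mem_cons.mp hy with rfl | hy
        · omega
        · exact hall y hy

-- A's max(s) is minus the first component of B's heap minimum
lemma pv_max_eq (h : List (Int × Int)) (m : Int × Int) (hmem : m ∈ h)
    (hmin : ∀ p ∈ h, pvLexLe m p) :
    PySem.List.max? (h.map (fun p => -p.1)) (fun y => y) = some (-m.1) := by
  cases h with
  | nil => simp at hmem
  | cons p t =>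
    obtain ⟨mx, hmx, hmem', hle, hall⟩ := pv_max_go (t.map (fun p => -p.1)) (-p.1)
    have e : PySem.List.max? ((p :: t).map (fun p => -p.1)) (fun y => y)
        = (t.map (fun p => -p.1)).foldl
          (fun acc x => match acc with
            | none => some x
            | some m => if m < x then some x else some m)
          (some (-p.1)) := by
      rw [List.map_cons]
      unfold PySem.List.max?
      rw [List.foldl_cons]
      congr 1
      funext acc x
      cases acc <;> rfl
    have hmxmem : mx ∈ (p :: t).map (fun p => -p.1) := by
      rcases hmem' with rfl | hmm2
      · exact List.mem_map.mpr ⟨p, List.mem_cons_self, rfl⟩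
      · rw [List.map_cons]; exact List.mem_cons_of_mem _ hmm2
    obtain ⟨q, hq, hqe⟩ := List.mem_map.mp hmxmem
    have hub : ∀ y ∈ (p :: t).map (fun p => -p.1), y ≤ mx := by
      intro y hy
      rw [List.map_cons] at hy
      rcases List.mem_cons.mp hy with rfl | hy'
      · exact hle
      · exact hall y hy'
    have h1 : -m.1 ≤ mx := hub _ (List.mem_map.mpr ⟨m, hmem, rfl⟩)
    have h2 : m.1 ≤ q.1 := by rcases hmin q hq with h | ⟨h, _⟩ <;> omega
    have h3 : mx = -m.1 := by omega
    rw [e, hmx, h3]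

-- removing the heap minimum from h is removing the first maximum from s
lemma pv_remove_commute : ∀ (h : List (Int × Int)) (m : Int × Int), m ∈ h →
    (∀ p ∈ h, pvLexLe m p) → ((h.map Prod.snd).Pairwise (· < ·)) →
    ∃ h', PySem.List.remove? h m = some h'
      ∧ PySem.List.remove? (h.map (fun p => -p.1)) (-m.1) = some (h'.map (fun p => -p.1))
      ∧ h'.Sublist h := by
  intro h
  induction h with
  | nil => intro m hm; exact absurd hm (by simp)
  | cons p t ih =>
    intro m hm hmin hpw
    rw [List.map_cons] at hpw
    obtain ⟨hhd, htl⟩ := List.pairwise_cons.mp hpw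
    by_cases hpm : p = m
    · subst hpm
      refine ⟨t, by simp, ?_, List.sublist_cons_self _ _⟩
      simp
    · have hmt : m ∈ t := by
        rcases List.mem_cons.mp hm with rfl | h
        · exact absurd rfl hpm
        · exact h
      have hfne : p.1 ≠ m.1 := by
        intro he
        rcases hmin p List.mem_cons_self with h | ⟨h, h2⟩
        · omega
        · have hlt : p.2 < m.2 := hhd m.2 (List.mem_map.mpr ⟨m, hmt, rfl⟩)
          omega
      have hne : p ≠ m := fun he => hfne (by rw [he])
      obtain ⟨t', ht', htv, hsub⟩ := ih m hmt
        (fun q hq => hmin q (List.mem_cons_of_mem _ hq)) htl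
      refine ⟨p :: t', ?_, ?_, List.Sublist.cons₂ _ hsub⟩
      · rw [PySem.List.remove?_cons_of_ne _ hne, ht']; rfl
      · have hv : (-p.1) ≠ (-m.1) := by omega
        simp only [List.map_cons]
        rw [PySem.List.remove?_cons_of_ne _ hv, htv]
        rfl

-- the loop bisimulation: A's list s and B's pair list h stay related
lemma pv_loop (arr : List Int) : ∀ (k : Nat) (j : Int) (s : List Int) (h : List (Int × Int)),
    ((arr.length : Int) - j).toNat = k →
    s = h.map (fun p => -p.1) →
    (h.map Prod.snd).Pairwise (· < ·) →
    (∀ p ∈ h, p.2 < j) →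
    ∃ h',
      (PySem.List.pyRange j (arr.length : Int) 1).foldl (pvHeapStep arr) h = h'
      ∧ (PySem.List.pyRange j (arr.length : Int) 1).foldl (pvStepA arr) s
          = h'.map (fun p => -p.1)
      ∧ (h'.map Prod.snd).Pairwise (· < ·) := by
  intro k
  induction k with
  | zero =>
    intro j s h hk hs hpw _
    rw [PySem.List.pyRange_one_eq_nil (by omega)]
    exact ⟨h, rfl, hs, hpw⟩
  | succ k ih =>
    intro j s h hk hs hpw hlt
    have hj : j < (arr.length : Int) := by omega
    rw [PySem.List.pyRange_one_cons hj]
    simp only [List.foldl_cons]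
    by_cases hh : h = []
    · subst hh
      have hs0 : s = [] := by simpa using hs
      subst hs0
      have eA : pvStepA arr [] j = [] := by
        unfold pvStepA
        cases hpg : PySem.List.pyGet? arr j <;> rfl
      have eB : pvHeapStep arr [] j = [] := by
        unfold pvHeapStep
        cases hpg : PySem.List.pyGet? arr j <;> rfl
      rw [eA, eB]
      exact ih (j + 1) [] [] (by omega) rfl (by simp) (by simp)
    · obtain ⟨m, hm, hmem, hmin⟩ := pv_min2_spec h hh
      have hmax : PySem.List.max? s (fun y => y) = some (-m.1) := by
        rw [hs]; exact pv_max_eq h m hmem hmin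
      cases hx : PySem.List.pyGet? arr j with
      | none =>
        have eA : pvStepA arr s j = s := by unfold pvStepA; rw [hmax, hx]
        have eB : pvHeapStep arr h j = h := by unfold pvHeapStep; rw [hx, hm]
        rw [eA, eB]
        exact ih (j + 1) s h (by omega) hs hpw (fun p hp => by have := hlt p hp; omega)
      | some x =>
        by_cases hc : -m.1 > x
        · obtain ⟨h', hrem, hremv, hsub⟩ := pv_remove_commute h m hmem hmin hpw
          have eA : pvStepA arr s j = (PySem.List.remove? s (-m.1)).getD s ++ [x] := by
            unfold pvStepA; rw [hmax, hx]; exact if_pos hc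
          have eB : pvHeapStep arr h j = (PySem.List.remove? h m).getD h ++ [(-x, j)] := by
            unfold pvHeapStep; rw [hx, hm]; exact if_pos hc
          rw [eA, eB, hrem, Option.getD_some]
          have hsubsnd : (h'.map Prod.snd).Sublist (h.map Prod.snd) := hsub.map _
          have hpw' : (h'.map Prod.snd).Pairwise (· < ·) := hpw.sublist hsubsnd
          have hlt' : ∀ q ∈ h', q.2 < j := fun q hq => hlt q (hsub.subset hq)
          have hsv : (PySem.List.remove? s (-m.1)).getD s ++ [x]
              = (h' ++ [(-x, j)]).map (fun p => -p.1) := by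
            rw [hs, hremv]
            simp
          refine ih (j + 1) _ (h' ++ [(-x, j)]) (by omega) hsv ?_ ?_
          · simp only [List.map_append, List.map_cons, List.map_nil]
            refine List.pairwise_append.mpr ⟨hpw', by simp, ?_⟩
            intro a ha b hb
            simp only [List.mem_singleton] at hb
            subst hb
            obtain ⟨q, hq, rfl⟩ := List.mem_map.mp ha
            exact hlt' q hq
          · intro q hq
            rcases List.mem_append.mp hq with hq | hq
            · have := hlt' q hq; omega
            · simp only [List.mem_singleton] at hq; subst hq; simp
        · have eA : pvStepA arr s j = s := by
            unfold pvStepA; rw [hmax, hx]; exact if_neg hc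
          have eB : pvHeapStep arr h j = h := by
            unfold pvHeapStep; rw [hx, hm]; exact if_neg hc
          rw [eA, eB]
          exact ih (j + 1) s h (by omega) hs hpw (fun p hp => by have := hlt p hp; omega)

-- ===== VERDICT (by name: the statement is the Claim_ definition above) =====
theorem performant_smallest_spec : Claim_equal_performant_smallest := by
  intro arr n _ hpre
  have hn : 0 ≤ n := by rcases hpre with h | ⟨_, h⟩ <;> omega
  have hmapv : ((PySem.List.enumerate (PySem.List.slice arr none (some n)) 0).map
      (fun p => (-p.2, p.1))).map (fun p : Int × Int => -p.1)
      = PySem.List.slice arr none (some n) := by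
    rw [List.map_map]
    have he : ((fun p : Int × Int => -p.1) ∘ fun p : Int × Int => (-p.2, p.1))
        = fun p : Int × Int => p.2 := by funext p; simp
    rw [he, PySem.List.map_snd_enumerate]
  have hpw0 : (((PySem.List.enumerate (PySem.List.slice arr none (some n)) 0).map
      (fun p => (-p.2, p.1))).map Prod.snd).Pairwise (· < ·) := by
    rw [List.map_map]
    have he : (Prod.snd ∘ fun p : Int × Int => (-p.2, p.1)) = fun p : Int × Int => p.1 := by
      funext p; rfl
    rw [he, PySem.List.map_fst_enumerate]
    exact PySem.List.pairwise_lt_pyRange_one _ _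
  have hlen : ((PySem.List.slice arr none (some n)).length : Int) ≤ n := by
    rw [PySem.List.slice_to _ hn]
    have h1 : (arr.take n.toNat).length ≤ n.toNat := by simp
    omega
  have hlt0 : ∀ p ∈ (PySem.List.enumerate (PySem.List.slice arr none (some n)) 0).map
      (fun p => (-p.2, p.1)), p.2 < n := by
    intro p hp
    obtain ⟨q, hq, rfl⟩ := List.mem_map.mp hp
    obtain ⟨k, hk, rfl⟩ := (PySem.List.mem_enumerate_iff _ _ _).mp hq
    have hki : (k : Int) < ((PySem.List.slice arr none (some n)).length : Int) := by
      exact_mod_cast hk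
    show (0 : Int) + (k : Int) < n
    omega
  obtain ⟨h', hB, hA, hpw'⟩ := pv_loop arr (((arr.length : Int) - n).toNat) n _ _ rfl
    hmapv.symm hpw0 hlt0
  show performant_smallest arr n = performant_smallest_alt arr n
  have hAeq : performant_smallest arr n
      = (PySem.List.pyRange n (arr.length : Int) 1).foldl (pvStepA arr)
        (PySem.List.slice arr none (some n)) := rfl
  have hBeq : performant_smallest_alt arr n
      = (PySem.List.sorted ((PySem.List.pyRange n (arr.length : Int) 1).foldl (pvHeapStep arr)
          ((PySem.List.enumerate (PySem.List.slice arr none (some n)) 0).map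
            (fun p => (-p.2, p.1)))) Prod.snd).map (fun p => -p.1) := rfl
  rw [hAeq, hBeq, hA, hB]
  rw [PySem.List.sorted_eq_self_of_pairwise h' Prod.snd
    ((List.pairwise_map.mp hpw').imp (fun h => le_of_lt h))]
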